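-- pv_equiv track=rewrite | github.com/GMONNET-prof/TP-not- | Fannie MAYOUSSIER.py | entier_vers_binaire
-- ===== SOURCE A (Python) =====
-- def entier_vers_binaire(chaine):
--     """Transforme la chaine d'entier de base 10 en chaine de base 2
--        Entrée : une chaine d'int en base 10 (str)
--        Sortie : la chaine d'int en base 2 (str)"""
--     chaine_int = chaine.split(".")
--     chaine_binaire = ""
--     for elt in chaine_int :
--         assert int(elt) <= 255 and int(elt) >= 0
--         nbre_binaire = ""
--         for i in range(7, -1,-1):
--             res = int(elt) - 2**i
--             if res >= 0 :
--                 nbre_binaire += "1"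
--                 elt = int(elt) - 2**i
--             else :
--                 nbre_binaire += "0"
--         chaine_binaire = chaine_binaire + nbre_binaire + "."
--     return chaine_binaire[:-1]
-- ===== SOURCE B (Python) =====
-- def entier_vers_binaire(chaine):
--     """Transforme la chaine d'entier de base 10 en chaine de base 2
--        Entrée : une chaine d'int en base 10 (str)
--        Sortie : la chaine d'int en base 2 (str)"""
--     octets = []
--     for elt in chaine.split("."):
--         n = int(elt)
--         assert 0 <= n <= 255
--         bits = []
--         while n > 0:
--             bits.append(str(n % 2))
--             n = n // 2
--         s = "".join(reversed(bits))
--         octets.append("0" * (8 - len(s)) + s)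
--     return ".".join(octets)
-- ===== Notes on version B (the rewrite author's own statement) =====
-- stated objective: alternative
-- what changed: Each octet's 8-bit string is built by repeated division (collect n % 2 while n //= 2, reverse, left-pad with zeros to 8) and the pieces dot-joined, replacing A's descending power-of-two subtraction scan that decides each bit by trial subtraction and its trailing-separator-then-slice assembly.
import Mathlib
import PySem

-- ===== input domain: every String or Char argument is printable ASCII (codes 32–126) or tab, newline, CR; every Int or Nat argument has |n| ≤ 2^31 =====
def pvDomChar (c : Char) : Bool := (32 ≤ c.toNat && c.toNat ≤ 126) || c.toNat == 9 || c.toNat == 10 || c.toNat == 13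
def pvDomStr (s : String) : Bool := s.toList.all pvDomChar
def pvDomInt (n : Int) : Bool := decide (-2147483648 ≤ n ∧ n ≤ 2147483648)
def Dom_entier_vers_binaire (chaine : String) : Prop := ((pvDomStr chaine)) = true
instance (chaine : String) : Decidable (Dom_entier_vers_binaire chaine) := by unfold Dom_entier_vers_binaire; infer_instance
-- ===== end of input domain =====

-- B replaces A's descending power-of-two subtraction scan by repeated division/modulo
-- bit collection (LSB-first, then reversed and zero-padded): an alternative base-conversion
-- strategy of the same cost. Equivalence is proved on inputs whose '.'-separated pieces
-- all parse as ints in [0, 255] (elsewhere both Pythons raise).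

-- ===== PORT A =====
-- inner loop of A over range(7, -1, -1), state = (current value of elt, nbre_binaire)
def evbCoreA (n : Int) : List Char :=
  ((PySem.List.pyRange 7 (-1) (-1)).foldl
      (fun (st : Int × List Char) i =>
        let res := st.1 - 2 ^ i.toNat
        if 0 ≤ res then (st.1 - 2 ^ i.toNat, st.2 ++ ['1'])
        else (st.1, st.2 ++ ['0']))
      (n, [])).2

def evbOctA (elt : List Char) : List Char :=
  match PySem.Int.ofChars? elt with
  | none => []    -- int(elt) raises ValueError; excluded by Pre_
  | some n => evbCoreA n

def entier_vers_binaire (chaine : String) : String :=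
  let chaine_int := PySem.Chars.splitOn chaine.toList ['.']
  let chaine_binaire := chaine_int.foldl (fun acc elt => acc ++ evbOctA elt ++ ['.']) []
  String.ofList (PySem.List.slice chaine_binaire none (some (-1)))

-- ===== PORT B =====
-- while n > 0: bits.append(str(n % 2)); n //= 2   (bits in order of appending, LSB first)
-- structural on a fuel counter (fuel = n suffices since n strictly halves)
def evbBitsB (fuel m : Nat) : List (List Char) :=
  match fuel with
  | 0 => []
  | f+1 => if m = 0 then [] else
      PySem.Int.toChars ((m % 2 : Nat) : Int) :: evbBitsB f (m / 2)

def evbCoreB (n : Int) : List Char :=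
  let s := PySem.Chars.join [] (evbBitsB n.toNat n.toNat).reverse
  PySem.List.pyRepeat ['0'] (8 - (PySem.Chars.len s : Int)) ++ s

def evbOctB (elt : List Char) : List Char :=
  match PySem.Int.ofChars? elt with
  | none => []    -- int(elt) raises ValueError; excluded by Pre_
  | some n => evbCoreB n

def entier_vers_binaire_alt (chaine : String) : String :=
  String.ofList (PySem.Chars.join ['.'] ((PySem.Chars.splitOn chaine.toList ['.']).map evbOctB))

-- ===== PRECONDITION & SPEC =====
-- Pre_ = exactly the inputs A returns on: every '.'-separated piece parses as an int
-- (else int() raises ValueError) in [0, 255] (else the assert raises AssertionError).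
def Pre_entier_vers_binaire (chaine : String) : Prop :=
  ∀ elt ∈ PySem.Chars.splitOn chaine.toList ['.'],
    ∃ n, PySem.Int.ofChars? elt = some n ∧ 0 ≤ n ∧ n ≤ 255
instance (chaine : String) : Decidable (Pre_entier_vers_binaire chaine) := by
  unfold Pre_entier_vers_binaire; infer_instance
def pvWitness_entier_vers_binaire : String := "192.168.0.1"

def Spec_entier_vers_binaire (chaine : String) (out : String) : Prop := out = entier_vers_binaire_alt chaine
instance (chaine : String) (out : String) : Decidable (Spec_entier_vers_binaire chaine out) := by unfold Spec_entier_vers_binaire; infer_instance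

-- ===== CLAIM (what is proved, stated in full; the proofs are below) =====
def Claim_equal_entier_vers_binaire : Prop := ∀ (chaine : String), Dom_entier_vers_binaire chaine → Pre_entier_vers_binaire chaine → Spec_entier_vers_binaire chaine (entier_vers_binaire chaine)

-- ===== LEMMAS AND PROOFS =====
-- the two per-octet computations agree on every value in [0, 255] (checked by the kernel)
set_option maxRecDepth 8192 in
theorem evbCore_eq : ∀ k : Fin 256, evbCoreA (k : Int) = evbCoreB (k : Int) := by
  decide

theorem evbOct_eq (elt : List Char) (n : Int)
    (h : PySem.Int.ofChars? elt = some n) (h0 : 0 ≤ n) (h1 : n ≤ 255) :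
    evbOctA elt = evbOctB elt := by
  have hk := evbCore_eq ⟨n.toNat, by omega⟩
  simp only [Int.toNat_of_nonneg h0] at hk
  simp [evbOctA, evbOctB, h, hk]

theorem dropLast_flatMap_aux (f : List Char → List Char) :
    ∀ (l : List (List Char)),
      (l.flatMap (fun e => f e ++ ['.'])).dropLast = PySem.Chars.join ['.'] (l.map f)
  | [] => by simp [PySem.Chars.join, List.intercalate]
  | [a] => by simp [PySem.Chars.join, List.intercalate]
  | a :: b :: t2 => by
    rw [List.map_cons, List.map_cons, PySem.Chars.join_cons_cons, List.flatMap_cons,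
      List.dropLast_append_of_ne_nil (by simp), ← List.map_cons,
      dropLast_flatMap_aux f (b :: t2)]

theorem dropLast_flatMap_eq_join (f : List Char → List Char) (l : List (List Char)) :
    (l.foldl (fun acc elt => acc ++ f elt ++ ['.']) []).dropLast
      = PySem.Chars.join ['.'] (l.map f) := by
  have h : l.foldl (fun acc elt => acc ++ f elt ++ ['.']) []
      = l.flatMap (fun e => f e ++ ['.']) := by
    have := PySem.List.foldl_append_eq_flatMap (g := fun e => f e ++ ['.']) (l := l) (acc := ([] : List Char))
    simpa [List.append_assoc] using this
  rw [h, dropLast_flatMap_aux]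

-- ===== VERDICT (by name: the statement is the Claim_ definition above) =====
theorem entier_vers_binaire_spec : Claim_equal_entier_vers_binaire := by
  intro chaine _ hpre
  unfold Spec_entier_vers_binaire
  simp only [entier_vers_binaire, entier_vers_binaire_alt, PySem.List.slice_to_neg_one]
  rw [dropLast_flatMap_eq_join evbOctA]
  rw [List.map_congr_left (fun elt helt => by
    obtain ⟨n, hn, h0, h1⟩ := hpre elt helt
    exact evbOct_eq elt n hn h0 h1)]
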